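-- pv_equiv track=rewrite | github.com/inabiyouni/K-mean-Elkan | K_means_Elkan.py | getDistOfPnts
-- ===== SOURCE A (Python) =====
-- def getDistOfPnts(subMat):
--     dict = {}
--     maxRep = 0
--     for key in subMat:
--         if key in dict:
--             dict[key] += 1
--             if dict[key] > maxRep: maxRep = dict[key]
--         else:
--             dict[key] = 1
--             if maxRep == 0: maxRep = 1
--     return dict, maxRep
-- ===== SOURCE B (Python) =====
-- def getDistOfPnts(subMat):
--     order = []
--     for key in subMat:
--         if key not in order:
--             order.append(key)
--     counts = {key: subMat.count(key) for key in order}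
--     return counts, max(counts.values(), default=0)
-- ===== Notes on version B (the rewrite author's own statement) =====
-- stated objective: alternative
-- what changed: B drops A's incremental counter-with-running-max entirely: it first collects the distinct keys in first-occurrence order, then computes each key's frequency by a full list.count scan (a per-key counting algorithm instead of a single fused incremental pass), and takes the max of those counts with default 0.
import Mathlib
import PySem

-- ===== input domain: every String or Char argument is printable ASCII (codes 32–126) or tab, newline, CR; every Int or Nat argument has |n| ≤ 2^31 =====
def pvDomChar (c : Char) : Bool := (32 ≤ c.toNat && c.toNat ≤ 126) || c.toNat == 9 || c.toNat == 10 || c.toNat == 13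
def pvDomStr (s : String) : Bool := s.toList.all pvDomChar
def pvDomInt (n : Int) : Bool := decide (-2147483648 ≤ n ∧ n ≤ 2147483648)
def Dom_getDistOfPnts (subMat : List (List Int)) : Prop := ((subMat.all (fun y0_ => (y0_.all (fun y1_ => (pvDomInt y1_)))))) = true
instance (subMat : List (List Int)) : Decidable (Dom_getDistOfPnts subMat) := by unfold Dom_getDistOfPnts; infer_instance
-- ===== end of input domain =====

-- B replaces A's fused incremental count-and-running-max pass by a per-key counting algorithm:
-- dedup the keys in first-occurrence order, count each distinct key with a full list scan, then max (default 0).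
-- ===== PORT A =====
def getDistOfPnts (subMat : List (List Int)) : (List (List Int × Int)) × Int :=
  let st := subMat.foldl
    (fun (st : PySem.Dict (List Int) Int × Int) key =>
      if st.1.contains key then
        let d := st.1.modify key 0 (· + 1)
        let c := d.getD key 0
        (d, if c > st.2 then c else st.2)
      else
        (st.1.insert key 1, if st.2 = 0 then 1 else st.2))
    (PySem.Dict.empty, 0)
  (st.1.items, st.2)

-- ===== PORT B =====
def getDistOfPnts_alt (subMat : List (List Int)) : (List (List Int × Int)) × Int :=
  let order := subMat.foldl
    (fun (acc : List (List Int)) key => if key ∈ acc then acc else acc ++ [key]) []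
  -- dict comprehension over the (duplicate-free) distinct keys: its items are exactly this map
  let counts := order.map (fun key => (key, (PySem.List.count subMat key : Int)))
  (counts, PySem.List.maxD (counts.map (fun p => p.2)) (fun v => v) 0)

-- ===== PRECONDITION & SPEC =====
def Spec_getDistOfPnts (subMat : List (List Int)) (out : (List (List Int × Int)) × Int) : Prop := out = getDistOfPnts_alt subMat
instance (subMat : List (List Int)) (out : (List (List Int × Int)) × Int) : Decidable (Spec_getDistOfPnts subMat out) := by unfold Spec_getDistOfPnts; infer_instance

-- ===== CLAIM (what is proved, stated in full; the proofs are below) =====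
def Claim_equal_getDistOfPnts : Prop := ∀ (subMat : List (List Int)), Dom_getDistOfPnts subMat → Spec_getDistOfPnts subMat (getDistOfPnts subMat)

-- ===== LEMMAS AND PROOFS =====

-- max(vs, default=0) written as a match on max?, used as the canonical running-max value in the A-side invariant
def pvMaxD (vs : List Int) : Int :=
  match PySem.List.max? vs (fun v => v) with
  | none => 0
  | some m => m

lemma pvMaxD_eq_of {vs : List Int} {M : Int} (h1 : M ∈ vs) (h2 : ∀ y ∈ vs, y ≤ M) :
    pvMaxD vs = M := by
  have hne : vs ≠ [] := by intro h; subst h; simp at h1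
  obtain ⟨m, hm⟩ : ∃ m, PySem.List.max? vs (fun v => v) = some m := by
    cases hmm : PySem.List.max? vs (fun v => v) with
    | none => exact absurd ((PySem.List.max?_eq_none_iff _ _).1 hmm) hne
    | some m => exact ⟨m, rfl⟩
  have hmem := PySem.List.max?_mem hm
  have hmax := PySem.List.max?_isMax hm
  simp only [pvMaxD, hm]
  exact le_antisymm (h2 m hmem) (hmax M h1)

lemma pvMaxD_spec {vs : List Int} (h : vs ≠ []) :
    pvMaxD vs ∈ vs ∧ ∀ y ∈ vs, y ≤ pvMaxD vs := by
  obtain ⟨m, hm⟩ : ∃ m, PySem.List.max? vs (fun v => v) = some m := by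
    cases hmm : PySem.List.max? vs (fun v => v) with
    | none => exact absurd ((PySem.List.max?_eq_none_iff _ _).1 hmm) h
    | some m => exact ⟨m, rfl⟩
  simp only [pvMaxD, hm]
  exact ⟨PySem.List.max?_mem hm, PySem.List.max?_isMax hm⟩

-- A's dict update (membership test, then in-place bump or fresh insert) is a single insert-with-bumped-count
lemma pvDictStep (d : PySem.Dict (List Int) Int) (key : List Int) :
    (if d.contains key then d.modify key 0 (· + 1) else d.insert key 1)
      = d.insert key (d.getD key 0 + 1) := by
  by_cases h : d.contains key = true
  · simp only [h, if_pos]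
    rfl
  · simp only [h, if_neg, Bool.not_eq_true]
    have h0 : d.getD key 0 = 0 := PySem.Dict.getD_of_not_contains d 0 (by simpa using h)
    rw [h0]
    norm_num

-- one step of A's loop, under the invariant, is one insert-with-bumped-count paired with the new max
lemma pvStep (d : PySem.Dict (List Int) Int) (m : Int) (key : List Int)
    (hnd : d.keys.Nodup) (hpos : ∀ v ∈ d.values, 1 ≤ v) (hm : m = pvMaxD d.values) :
    (if d.contains key then
        let dd := d.modify key 0 (· + 1)
        let c := dd.getD key 0
        (dd, if c > m then c else m)
      else
        (d.insert key 1, if m = 0 then 1 else m))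
      = (d.insert key (d.getD key 0 + 1),
         pvMaxD (d.insert key (d.getD key 0 + 1)).values) := by
  by_cases h : d.contains key = true
  · -- key present: the in-place bump; new max = max of updated values
    have hdd : d.modify key 0 (· + 1) = d.insert key (d.getD key 0 + 1) := by
      have := pvDictStep d key
      rwa [if_pos h] at this
    simp only [h, if_pos, hdd]
    have hc : (d.insert key (d.getD key 0 + 1)).getD key 0 = d.getD key 0 + 1 :=
      PySem.Dict.getD_insert_self ..
    rw [hc]
    congr 1
    set v := d.getD key 0 with hv
    have hkey : key ∈ d.keys := (PySem.Dict.contains_iff_mem_keys d key).1 h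
    have hvals : d.values = d.keys.map (fun k => d.getD k 0) :=
      PySem.Dict.values_eq_map_keys d hnd 0
    have hnd' : (d.insert key (v + 1)).keys.Nodup := PySem.Dict.nodup_keys_insert d key _ hnd
    have hkeys' : (d.insert key (v + 1)).keys = d.keys :=
      PySem.Dict.keys_insert_of_contains d _ h
    have hvals' : (d.insert key (v + 1)).values
        = d.keys.map (fun k => if k = key then v + 1 else d.getD k 0) := by
      rw [PySem.Dict.values_eq_map_keys _ hnd' 0, hkeys']
      refine List.map_congr_left (fun k _ => ?_)
      rw [PySem.Dict.getD_insert]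
    have hvmem : v ∈ d.values := by
      rw [hvals]; exact List.mem_map.2 ⟨key, hkey, rfl⟩
    have hv1 : 1 ≤ v := hpos v hvmem
    have hne : d.values ≠ [] := by intro hh; rw [hh] at hvmem; simp at hvmem
    obtain ⟨hmmem, hmmax⟩ := pvMaxD_spec hne
    rw [← hm] at hmmem hmmax
    have hbound : ∀ y ∈ (d.insert key (v + 1)).values, y ≤ max (v + 1) m := by
      intro y hy
      rw [hvals'] at hy
      obtain ⟨k, hk, hyk⟩ := List.mem_map.1 hy
      by_cases hkk : k = key
      · rw [if_pos hkk] at hyk; omega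
      · rw [if_neg hkk] at hyk
        have : y ∈ d.values := by rw [hvals]; exact List.mem_map.2 ⟨k, hk, hyk⟩
        have := hmmax y this
        omega
    by_cases hcm : v + 1 > m
    · rw [if_pos hcm]
      refine (pvMaxD_eq_of ?_ ?_).symm
      · rw [hvals']
        exact List.mem_map.2 ⟨key, hkey, by rw [if_pos rfl]⟩
      · intro y hy; have := hbound y hy; omega
    · rw [if_neg hcm]
      refine (pvMaxD_eq_of ?_ ?_).symm
      · rw [hvals]  at hmmem
        obtain ⟨k0, hk0, hmk0⟩ := List.mem_map.1 hmmem
        have hk0ne : k0 ≠ key := by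
          intro hh; rw [hh] at hmk0; rw [← hv] at hmk0; omega
        rw [hvals']
        exact List.mem_map.2 ⟨k0, hk0, by rw [if_neg hk0ne]; exact hmk0⟩
      · intro y hy; have := hbound y hy; omega
  · -- key absent: fresh entry with count 1 appended to the values
    have h0 : d.getD key 0 = 0 :=
      PySem.Dict.getD_of_not_contains d 0 (by simpa using h)
    simp only [h, if_neg, Bool.false_eq_true, not_false_iff, h0]
    have h1 : (0 : Int) + 1 = 1 := by norm_num
    rw [h1]
    congr 1
    have hvals' : (d.insert key 1).values = d.values ++ [1] := by
      simp only [PySem.Dict.values,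
        PySem.Dict.items_insert_of_not_contains d 1 (by simpa using h), List.map_append,
        List.map_cons, List.map_nil]
    rw [hvals']
    by_cases hv : d.values = []
    · rw [hv] at hm ⊢
      have : m = 0 := by rw [hm]; rfl
      rw [if_pos this]
      refine (pvMaxD_eq_of (by simp) ?_).symm
      intro y hy; simp at hy; omega
    · obtain ⟨hmmem, hmmax⟩ := pvMaxD_spec hv
      rw [← hm] at hmmem hmmax
      have hm1 : 1 ≤ m := hpos m hmmem
      rw [if_neg (by omega)]
      refine (pvMaxD_eq_of (List.mem_append_left _ hmmem) ?_).symm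
      intro y hy
      rcases List.mem_append.1 hy with hy | hy
      · exact hmmax y hy
      · simp at hy; omega

lemma pvLoop (xs : List (List Int)) (d : PySem.Dict (List Int) Int) (m : Int)
    (hnd : d.keys.Nodup) (hpos : ∀ v ∈ d.values, 1 ≤ v) (hm : m = pvMaxD d.values) :
    xs.foldl
      (fun (st : PySem.Dict (List Int) Int × Int) key =>
        if st.1.contains key then
          let dd := st.1.modify key 0 (· + 1)
          let c := dd.getD key 0
          (dd, if c > st.2 then c else st.2)
        else
          (st.1.insert key 1, if st.2 = 0 then 1 else st.2))
      (d, m)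
    = (xs.foldl (fun (dd : PySem.Dict (List Int) Int) key => dd.insert key (dd.getD key 0 + 1)) d,
       pvMaxD (xs.foldl (fun (dd : PySem.Dict (List Int) Int) key => dd.insert key (dd.getD key 0 + 1)) d).values) := by
  induction xs generalizing d m with
  | nil => simp only [List.foldl_nil]; rw [hm]
  | cons key xs ih =>
    rw [List.foldl_cons, List.foldl_cons]
    have hstep := pvStep d m key hnd hpos hm
    dsimp only
    rw [hstep]
    have hnd' : (d.insert key (d.getD key 0 + 1)).keys.Nodup :=
      PySem.Dict.nodup_keys_insert d key _ hnd
    have hpos' : ∀ v ∈ (d.insert key (d.getD key 0 + 1)).values, 1 ≤ v := by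
      intro v hv
      rcases PySem.Dict.mem_values_insert _ _ _ _ hv with hv | hv
      · subst hv
        by_cases h : d.contains key = true
        · have : d.getD key 0 ∈ d.values := by
            rw [PySem.Dict.values_eq_map_keys d hnd 0]
            exact List.mem_map.2 ⟨key, (PySem.Dict.contains_iff_mem_keys d key).1 h, rfl⟩
          have := hpos _ this; omega
        · have h0 : d.getD key 0 = 0 :=
            PySem.Dict.getD_of_not_contains d 0 (by simpa using h)
          omega
      · exact hpos v hv
    exact ih _ _ hnd' hpos' rfl

-- B's order-building loop is the ordered dedup Set.ofList
lemma pvOrder_eq_ofList (xs : List (List Int)) :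
    xs.foldl (fun (acc : List (List Int)) key => if key ∈ acc then acc else acc ++ [key]) []
      = PySem.Set.ofList xs := by
  rw [PySem.Set.ofList_eq_foldl]
  congr 1; funext a k; unfold PySem.Set.add; split <;> split <;> simp_all

lemma pvMaxD_eq_maxD (vs : List Int) :
    PySem.List.maxD vs (fun v => v) 0 = pvMaxD vs := by
  unfold PySem.List.maxD pvMaxD
  cases PySem.List.max? vs (fun v => v) <;> rfl

-- ===== VERDICT (by name: the statement is the Claim_ definition above) =====
theorem getDistOfPnts_spec : Claim_equal_getDistOfPnts := by
  intro subMat _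
  unfold Spec_getDistOfPnts getDistOfPnts getDistOfPnts_alt
  rw [pvLoop subMat PySem.Dict.empty 0 PySem.Dict.nodup_keys_empty (by simp [PySem.Dict.empty, PySem.Dict.values]) rfl]
  rw [PySem.Dict.foldl_insert_getD_add_one_eq_counter]
  rw [pvOrder_eq_ofList]
  simp only [PySem.Dict.items_counter, PySem.List.count_eq, pvMaxD_eq_maxD,
    PySem.Dict.values, List.map_map]
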